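-- pv_equiv track=rewrite | github.com/d4yronsc/kodi-subtitle-translator-pro | lib/tamabin_postprocess.py | _normalize_quotes
-- ===== SOURCE A (Python) =====
-- def _normalize_quotes(text):
--     """Normalize quotation marks to standard Spanish usage."""
--     # Replace straight double quotes with angular quotes « »
--     # Only if they appear as pairs
--     count = text.count('"')
--     if count >= 2 and count % 2 == 0:
--         # Replace pairs
--         is_open = True
--         result = []
--         for ch in text:
--             if ch == '"':
--                 result.append('«' if is_open else '»')
--                 is_open = not is_open
--             else:
--                 result.append(ch)
--         text = ''.join(result)
--     return text
-- ===== SOURCE B (Python) =====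
-- def _normalize_quotes(text):
--     """Normalize quotation marks to standard Spanish usage."""
--     # Split on straight quotes; with an even, positive number of quotes the
--     # segments between them are rejoined with alternating angular quotes.
--     parts = text.split('"')
--     n = len(parts) - 1
--     if n >= 2 and n % 2 == 0:
--         out = parts[0]
--         for i, p in enumerate(parts[1:], 1):
--             out += ('«' if i % 2 == 1 else '»') + p
--         return out
--     return text
-- ===== Notes on version B (the rewrite author's own statement) =====
-- stated objective: idiomatic
-- what changed: Replaces the per-character toggle loop (is_open flag) with split-on-quote and rejoining the segments with alternating angular quotes chosen by segment index parity.
import Mathlib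
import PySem

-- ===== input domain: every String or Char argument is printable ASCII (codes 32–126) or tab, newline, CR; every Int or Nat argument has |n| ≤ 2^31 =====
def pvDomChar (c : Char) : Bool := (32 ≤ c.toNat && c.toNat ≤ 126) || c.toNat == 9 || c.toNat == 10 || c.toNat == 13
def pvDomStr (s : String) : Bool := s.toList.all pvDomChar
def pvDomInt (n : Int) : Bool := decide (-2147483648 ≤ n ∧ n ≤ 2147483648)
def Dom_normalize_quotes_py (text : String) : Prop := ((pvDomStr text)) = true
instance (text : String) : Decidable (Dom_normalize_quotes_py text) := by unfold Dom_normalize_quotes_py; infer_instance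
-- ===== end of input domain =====

-- B replaces A's per-character is_open toggle loop by split-on-'"' and a rejoin with
-- alternating « » chosen by segment-index parity (idiomatic decomposition; same cost).

-- ===== PORT A =====
def normalize_quotes_py (text : String) : String :=
  let count := PySem.Str.count text "\""
  if count ≥ 2 ∧ count % 2 = 0 then
    let st := text.toList.foldl
      (fun (st : Bool × List Char) ch =>
        if ch = '"' then (!st.1, st.2 ++ [if st.1 then '«' else '»'])
        else (st.1, st.2 ++ [ch]))
      (true, [])
    String.ofList st.2
  else text

-- ===== PORT B =====
-- text.split('"'): the separator is the nonempty literal '"', so Python's split always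
-- succeeds; ported with PySem.Chars.splitOn (the sep ≠ "" form of str.split).
def normalize_quotes_py_alt (text : String) : String :=
  let parts : List String := (PySem.Chars.splitOn text.toList ['"']).map String.ofList
  let n := parts.length - 1
  if n ≥ 2 ∧ n % 2 = 0 then
    let st := (parts.drop 1).foldl
      (fun (st : Nat × String) p =>
        (st.1 + 1, st.2 ++ (if st.1 % 2 = 1 then "«" else "»") ++ p))
      (1, parts.headD "")
    st.2
  else text

-- ===== PRECONDITION & SPEC =====
def Spec_normalize_quotes_py (text : String) (out : String) : Prop := out = normalize_quotes_py_alt text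
instance (text : String) (out : String) : Decidable (Spec_normalize_quotes_py text out) := by unfold Spec_normalize_quotes_py; infer_instance

-- ===== CLAIM (what is proved, stated in full; the proofs are below) =====
def Claim_equal_normalize_quotes_py : Prop := ∀ (text : String), Dom_normalize_quotes_py text → Spec_normalize_quotes_py text (normalize_quotes_py text)

-- ===== LEMMAS AND PROOFS =====

-- Structural characterisation of splitting a char list at '"'.
def pvSplitQ : List Char → List (List Char)
  | [] => [[]]
  | x :: xs => if x = '"' then [] :: pvSplitQ xs else (pvSplitQ xs).modifyHead (x :: ·)

theorem pvSplitQ_ne_nil (l : List Char) : pvSplitQ l ≠ [] := by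
  induction l with
  | nil => simp [pvSplitQ]
  | cons x xs ih =>
    simp only [pvSplitQ]
    split
    · simp
    · cases h : pvSplitQ xs with
      | nil => exact absurd h ih
      | cons a as => simp [List.modifyHead]

theorem pvSplitQ_length (l : List Char) : (pvSplitQ l).length = l.count '"' + 1 := by
  induction l with
  | nil => simp [pvSplitQ]
  | cons x xs ih =>
    simp only [pvSplitQ]
    by_cases h : x = '"'
    · simp [h, ih]
    · cases hs : pvSplitQ xs with
      | nil => exact absurd hs (pvSplitQ_ne_nil xs)
      | cons a as =>
        simp [h, hs, List.modifyHead] at *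
        omega

theorem pv_splitOn_go (l : List Char) : ∀ (fuel : Nat) (cur : List Char) (acc : List (List Char)),
    l.length ≤ fuel →
    PySem.Chars.splitOn.go ['"'] fuel l cur acc
      = acc.reverse ++ (pvSplitQ l).modifyHead (cur.reverse ++ ·) := by
  induction l with
  | nil =>
    intro fuel cur acc _
    cases fuel <;> simp [PySem.Chars.splitOn.go, pvSplitQ]
  | cons x xs ih =>
    intro fuel cur acc hle
    cases fuel with
    | zero => simp at hle
    | succ f =>
      simp only [PySem.Chars.splitOn.go]
      by_cases h : x = '"'
      · subst h
        rw [if_pos (by simp [List.isPrefixOf])]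
        simp only [List.length_cons] at hle
        simp only [List.length_singleton, List.drop_succ_cons, List.drop_zero]
        rw [ih f [] (List.reverse cur :: acc) (by omega)]
        cases hs : pvSplitQ xs with
        | nil => exact absurd hs (pvSplitQ_ne_nil xs)
        | cons a as => simp [pvSplitQ, hs, List.modifyHead]
      · rw [if_neg (by simp [List.isPrefixOf]; intro hc; exact h (by simpa using hc.symm))]
        rw [ih f (x :: cur) acc (by simpa using Nat.le_of_succ_le_succ hle)]
        cases hs : pvSplitQ xs with
        | nil => exact absurd hs (pvSplitQ_ne_nil xs)
        | cons a as => simp [pvSplitQ, h, hs, List.modifyHead]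

theorem pv_splitOn_eq (l : List Char) : PySem.Chars.splitOn l ['"'] = pvSplitQ l := by
  rw [PySem.Chars.splitOn, pv_splitOn_go l (l.length + 1) [] [] (by omega)]
  cases hs : pvSplitQ l with
  | nil => exact absurd hs (pvSplitQ_ne_nil l)
  | cons a as => simp [List.modifyHead]

theorem pv_count_go (l : List Char) : ∀ (fuel : Nat) (acc : Nat), l.length ≤ fuel →
    PySem.Chars.count.go ['"'] fuel l acc = acc + l.count '"' := by
  induction l with
  | nil => intro fuel acc _; cases fuel <;> simp [PySem.Chars.count.go]
  | cons x xs ih =>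
    intro fuel acc hle
    cases fuel with
    | zero => simp at hle
    | succ f =>
      simp only [PySem.Chars.count.go]
      by_cases h : x = '"'
      · subst h
        rw [if_pos (by simp [List.isPrefixOf])]
        simp only [List.length_singleton, List.drop_succ_cons, List.drop_zero]
        rw [ih f (acc + 1) (by simpa using Nat.le_of_succ_le_succ hle)]
        simp
        omega
      · rw [if_neg (by simp [List.isPrefixOf]; intro hc; exact h (by simpa using hc.symm))]
        rw [ih f acc (by simpa using Nat.le_of_succ_le_succ hle)]
        simp [h]

theorem pv_count_eq (l : List Char) : PySem.Chars.count l ['"'] = l.count '"' := by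
  rw [PySem.Chars.count]
  simp only [List.isEmpty_cons, if_false, Bool.false_eq_true]
  rw [pv_count_go l l.length 0 (le_refl _)]
  omega

-- A's toggle loop, structurally.
def pvToggle : Bool → List Char → List Char
  | _, [] => []
  | b, x :: xs =>
    if x = '"' then (if b then '«' else '»') :: pvToggle (!b) xs
    else x :: pvToggle b xs

theorem pv_foldA (l : List Char) : ∀ (b : Bool) (acc : List Char),
    (l.foldl (fun (st : Bool × List Char) ch =>
        if ch = '"' then (!st.1, st.2 ++ [if st.1 then '«' else '»'])
        else (st.1, st.2 ++ [ch])) (b, acc)).2 = acc ++ pvToggle b l := by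
  induction l with
  | nil => intro b acc; simp [pvToggle]
  | cons x xs ih =>
    intro b acc
    by_cases h : x = '"'
    · simp [h, pvToggle, List.foldl_cons, ih]
    · simp [h, pvToggle, List.foldl_cons, ih]

-- B's rejoin, structurally (segment index i, separator « for odd i).
def pvJoin : Nat → List (List Char) → List Char
  | _, [] => []
  | i, p :: ps => (if i % 2 = 1 then '«' else '»') :: (p ++ pvJoin (i + 1) ps)

theorem pv_foldB (ps : List (List Char)) : ∀ (i : Nat) (out : String),
    ((ps.map String.ofList).foldl
      (fun (st : Nat × String) p =>
        (st.1 + 1, st.2 ++ (if st.1 % 2 = 1 then "«" else "»") ++ p)) (i, out)).2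
      = out ++ String.ofList (pvJoin i ps) := by
  induction ps with
  | nil => intro i out; simp [pvJoin]
  | cons p ps ih =>
    intro i out
    simp only [List.map_cons, List.foldl_cons, ih, pvJoin]
    by_cases h : i % 2 = 1
    · rw [if_pos h, if_pos h,
         show ('«' :: (p ++ pvJoin (i + 1) ps)) = ['«'] ++ (p ++ pvJoin (i + 1) ps) from rfl,
         String.ofList_append, String.ofList_append,
         show String.ofList ['«'] = "«" from rfl]
      simp [String.append_assoc]
    · rw [if_neg h, if_neg h,
         show ('»' :: (p ++ pvJoin (i + 1) ps)) = ['»'] ++ (p ++ pvJoin (i + 1) ps) from rfl,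
         String.ofList_append, String.ofList_append,
         show String.ofList ['»'] = "»" from rfl]
      simp [String.append_assoc]

-- main correspondence: head segment ++ alternating rejoin = toggle output
theorem pv_main (l : List Char) : ∀ (i : Nat) (p : List Char) (ps : List (List Char)),
    pvSplitQ l = p :: ps → p ++ pvJoin i ps = pvToggle (i % 2 = 1) l := by
  induction l with
  | nil =>
    intro i p ps h
    simp [pvSplitQ] at h
    simp [h.1, h.2, pvJoin, pvToggle]
  | cons x xs ih =>
    intro i p ps h
    by_cases hx : x = '"'
    · subst hx
      simp [pvSplitQ] at h
      obtain ⟨hp, hps⟩ := h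
      subst hp; subst hps
      cases hs : pvSplitQ xs with
      | nil => exact absurd hs (pvSplitQ_ne_nil xs)
      | cons q qs =>
        simp only [pvJoin, List.nil_append, pvToggle, if_pos]
        rw [ih (i + 1) q qs hs]
        congr 1
        · by_cases h2 : i % 2 = 1 <;> simp [h2]
        · congr 1
          by_cases h2 : i % 2 = 1
          · simp [h2]; omega
          · simp [h2]; omega
    · simp only [pvSplitQ, if_neg hx] at h
      cases hs : pvSplitQ xs with
      | nil => exact absurd hs (pvSplitQ_ne_nil xs)
      | cons q qs =>
        rw [hs] at h
        simp [List.modifyHead] at h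
        obtain ⟨hp, hps⟩ := h
        subst hp; subst hps
        simp only [pvToggle, if_neg hx, List.cons_append]
        rw [ih i q qs hs]

-- ===== VERDICT (by name: the statement is the Claim_ definition above) =====
theorem normalize_quotes_py_spec : Claim_equal_normalize_quotes_py := by
  intro text _
  unfold Spec_normalize_quotes_py normalize_quotes_py normalize_quotes_py_alt
  simp only [PySem.Str.count_eq, show ("\"" : String).toList = ['"'] from rfl,
    pv_count_eq, pv_splitOn_eq, List.length_map, pvSplitQ_length, Nat.add_sub_cancel]
  cases hs : pvSplitQ text.toList with
  | nil => exact absurd hs (pvSplitQ_ne_nil _)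
  | cons p ps =>
    simp only [List.map_cons, List.headD_cons, List.drop_one, List.tail_cons]
    split_ifs with hcond
    · rw [pv_foldA, pv_foldB, ← String.ofList_append, pv_main text.toList 1 p ps hs]
      simp
    · rfl
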